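-- pv_equiv track=rewrite | github.com/se-lex/sfs-processor | formatters/sort_frontmatter.py | sort_amendments_list
-- ===== SOURCE A (Python) =====
-- def sort_amendments_list(amendment_lines: list) -> str:
--     """
--     Sorterar innehållet i en andringsforfattningar-lista.
--
--     Args:
--         amendment_lines: Lista med rader som representerar andringsforfattningar
--
--     Returns:
--         str: Sorterad YAML-representation av andringsforfattningar
--     """
--     AMENDMENT_ORDER = ['beteckning', 'rubrik', 'ikraft_datum', 'anteckningar']
--
--     # Hantera det felaktiga formatet där första raden börjar direkt efter kolon
--     processed_lines = []
--     for i, line in enumerate(amendment_lines):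
--         if i == 0 and line.strip().startswith('-'):
--             # Första raden börjar direkt efter kolon, lägg till med korrekt indentation
--             processed_lines.append('  ' + line.strip())
--         else:
--             processed_lines.append(line)
--
--     # Parsa amendment items
--     amendments = []
--     current_amendment = {}
--
--     for line in processed_lines:
--         stripped = line.strip()
--
--         # Ny amendment item (börjar med -)
--         if stripped.startswith('-'):
--             # Spara föregående amendment om den finns
--             if current_amendment:
--                 amendments.append(current_amendment)
--
--             # Starta ny amendment
--             current_amendment = {}
--
--             # Kolla om det finns data på samma rad som -
--             if ':' in stripped:
--                 parts = stripped[1:].split(':', 1)  # Ta bort - först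
--                 key = parts[0].strip()
--                 value = parts[1].strip() if len(parts) > 1 else ''
--                 current_amendment[key] = value
--
--         # Property inom amendment item
--         elif ':' in line and (line.startswith('    ') or line.startswith('  ')):
--             parts = line.strip().split(':', 1)
--             key = parts[0].strip()
--             value = parts[1].strip() if len(parts) > 1 else ''
--             if key:
--                 current_amendment[key] = value
--
--     # Spara sista amendment
--     if current_amendment:
--         amendments.append(current_amendment)
--
--     # Bygg sorterad YAML med korrekt indentation
--     if not amendments:
--         return ''
--
--     result_lines = []
--     for i, amendment in enumerate(amendments):
--         # Lägg till första property med - prefix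
--         first_prop = True
--         for prop in AMENDMENT_ORDER:
--             if prop in amendment:
--                 value = amendment[prop]
--                 # Lägg till citattecken runt värden som innehåller kolon eller speciella tecken
--                 if ':' in value or value.startswith('"') or '"' in value:
--                     if not (value.startswith('"') and value.endswith('"')):
--                         value = f'"{value}"'
--
--                 if first_prop:
--                     result_lines.append(f"  - {prop}: {value}")
--                     first_prop = False
--                 else:
--                     result_lines.append(f"    {prop}: {value}")
--
--         # Lägg till okända properties sist
--         unknown_props = [k for k in amendment.keys() if k not in AMENDMENT_ORDER]
--         for prop in unknown_props:
--             value = amendment[prop]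
--             # Lägg till citattecken runt värden som innehåller kolon eller speciella tecken
--             if ':' in value or value.startswith('"') or '"' in value:
--                 if not (value.startswith('"') and value.endswith('"')):
--                     value = f'"{value}"'
--
--             if first_prop:
--                 result_lines.append(f"  - {prop}: {value}")
--                 first_prop = False
--             else:
--                 result_lines.append(f"    {prop}: {value}")
--
--     return '\n' + '\n'.join(result_lines)
-- ===== SOURCE B (Python) =====
-- def sort_amendments_list(amendment_lines: list) -> str:
--     """
--     Sorterar innehållet i en andringsforfattningar-lista.
--
--     Re-implementation: scans the lines BACKWARDS, so each '-' line closes the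
--     group of property lines behind it (groups built back-to-front, no streaming
--     current-dict/flush accumulator), then emits each group's keys partitioned
--     by rank in one pass (no first-property flag, no separate unknown-key loop).
--     """
--     ORDER = ['beteckning', 'rubrik', 'ikraft_datum', 'anteckningar']
--
--     def kv(text):
--         parts = text.split(':', 1)
--         return parts[0].strip(), parts[1].strip() if len(parts) > 1 else ''
--
--     def fmt(prefix, key, v):
--         if (':' in v or '"' in v) and not (v.startswith('"') and v.endswith('"')):
--             v = f'"{v}"'
--         return f'{prefix}{key}: {v}'
--
--     def rank(k):
--         return ORDER.index(k) if k in ORDER else len(ORDER)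
--
--     # Backward scan: cur holds the pairs of the group currently open to the
--     # LEFT (collected in reverse); a '-' line contributes its own pair and
--     # closes that group.
--     rev_groups = []
--     cur = []
--     for line in reversed(amendment_lines):
--         s = line.strip()
--         if s.startswith('-'):
--             if ':' in s:
--                 cur.append(kv(s[1:]))
--             rev_groups.append(cur[::-1])
--             cur = []
--         elif ':' in line and line.startswith('  '):
--             k, v = kv(s)
--             if k:
--                 cur.append((k, v))
--     rev_groups.append(cur[::-1])
--
--     out = []
--     for pairs in reversed(rev_groups):
--         am = dict(pairs)
--         if not am:
--             continue
--         keys = [k for r in range(len(ORDER) + 1) for k in am if rank(k) == r]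
--         out.append(fmt('  - ', keys[0], am[keys[0]]))
--         out.extend(fmt('    ', k, am[k]) for k in keys[1:])
--
--     return '\n' + '\n'.join(out) if out else ''
-- ===== Notes on version B (the rewrite author's own statement) =====
-- stated objective: alternative
-- what changed: B drops A's first-line rewrite pass (a parse no-op), scans the lines BACKWARDS so each '-' line closes the group of property lines behind it instead of A's forward streaming current-dict/flush accumulator, and emits each group's keys by partitioning them into rank buckets in one pass instead of A's two emit loops (preferred keys then unknowns) threading a first_prop flag with duplicated quoting code.
import Mathlib
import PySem

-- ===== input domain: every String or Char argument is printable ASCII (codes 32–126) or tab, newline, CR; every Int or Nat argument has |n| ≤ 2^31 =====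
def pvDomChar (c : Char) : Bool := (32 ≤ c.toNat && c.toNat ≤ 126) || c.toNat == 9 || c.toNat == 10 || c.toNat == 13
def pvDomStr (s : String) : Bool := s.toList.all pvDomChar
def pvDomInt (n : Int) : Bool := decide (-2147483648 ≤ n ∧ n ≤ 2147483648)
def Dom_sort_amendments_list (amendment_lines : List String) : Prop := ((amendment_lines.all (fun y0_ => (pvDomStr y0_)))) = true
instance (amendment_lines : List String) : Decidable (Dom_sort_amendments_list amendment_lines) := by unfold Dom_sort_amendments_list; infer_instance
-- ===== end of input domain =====

-- B scans the lines backwards so each '-' line closes the group of property lines behind it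
-- (no streaming current-dict/flush accumulator), then emits each group's keys partitioned by
-- rank in one pass (no first-property flag, no separate unknown-key loop); objective: alternative.

def pvOrder : List String := ["beteckning", "rubrik", "ikraft_datum", "anteckningar"]

-- ===== PORT A =====
-- A repeats this quoting block verbatim in both emit loops; factored once for the port.
def pvQuoteA (value : String) : String :=
  if PySem.Str.isIn ":" value || PySem.Str.startswith value "\"" || PySem.Str.isIn "\"" value then
    if !(PySem.Str.startswith value "\"" && PySem.Str.endswith value "\"") then
      "\"" ++ value ++ "\""
    else value
  else value

-- the (identical) body of one iteration of A's two emit loops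
def pvEmitStepA (st : List String × Bool) (prop : String) (v : String) : List String × Bool :=
  let value := pvQuoteA v
  if st.2 then (st.1 ++ ["  - " ++ prop ++ ": " ++ value], false)
  else (st.1 ++ ["    " ++ prop ++ ": " ++ value], st.2)

-- one iteration of A's parse loop; state = (amendments, current_amendment)
def pvParseStepA (st : List (PySem.Dict String String) × PySem.Dict String String)
    (line : String) : List (PySem.Dict String String) × PySem.Dict String String :=
  let stripped := PySem.Str.strip line
  if PySem.Str.startswith stripped "-" then
    let amendments := if st.2.items ≠ [] then st.1 ++ [st.2] else st.1
    if PySem.Str.isIn ":" stripped then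
      -- ':' occurs in stripped[1:], so split(':', 1) returns a two-element list; getD defaults unreachable
      let parts := (PySem.Str.splitMax? (PySem.Str.slice stripped (some 1) none) ":" 1).getD []
      let key := PySem.Str.strip (parts.getD 0 "")
      let value := if 1 < parts.length then PySem.Str.strip (parts.getD 1 "") else ""
      (amendments, PySem.Dict.empty.insert key value)
    else (amendments, PySem.Dict.empty)
  else if PySem.Str.isIn ":" line &&
      (PySem.Str.startswith line "    " || PySem.Str.startswith line "  ") then
    let parts := (PySem.Str.splitMax? (PySem.Str.strip line) ":" 1).getD []
    let key := PySem.Str.strip (parts.getD 0 "")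
    let value := if 1 < parts.length then PySem.Str.strip (parts.getD 1 "") else ""
    if key ≠ "" then (st.1, st.2.insert key value) else st
  else st

def sort_amendments_list (amendment_lines : List String) : String :=
  let processed_lines := (PySem.List.enumerate amendment_lines).foldl
    (fun acc p =>
      if p.1 == 0 && PySem.Str.startswith (PySem.Str.strip p.2) "-" then
        acc ++ ["  " ++ PySem.Str.strip p.2]
      else acc ++ [p.2]) []
  let st := processed_lines.foldl pvParseStepA ([], PySem.Dict.empty)
  let amendments := if st.2.items ≠ [] then st.1 ++ [st.2] else st.1
  if amendments = [] then ""
  else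
    let result_lines := amendments.foldl (fun lines am =>
      let s1 := pvOrder.foldl
        (fun st2 prop => if am.contains prop then pvEmitStepA st2 prop (am.getD prop "") else st2)
        (lines, true)
      let unknown_props := am.keys.filter (fun k => !pvOrder.contains k)
      (unknown_props.foldl (fun st2 prop => pvEmitStepA st2 prop (am.getD prop "")) s1).1) []
    "\n" ++ PySem.Str.join "\n" result_lines

-- ===== PORT B =====
-- kv(text): key/value of "k: v" (call sites guarantee ':' occurs in text)
def pvKV (text : String) : String × String :=
  let parts := (PySem.Str.splitMax? text ":" 1).getD []
  (PySem.Str.strip (parts.getD 0 ""),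
   if 1 < parts.length then PySem.Str.strip (parts.getD 1 "") else "")

-- the quoting condition of Source B's fmt, factored
def pvQuoteB (v : String) : String :=
  if (PySem.Str.isIn ":" v || PySem.Str.isIn "\"" v) &&
      !(PySem.Str.startswith v "\"" && PySem.Str.endswith v "\"") then
    "\"" ++ v ++ "\""
  else v

def pvFmt (pre key v : String) : String := pre ++ key ++ ": " ++ pvQuoteB v

-- rank(k) = ORDER.index(k) if k in ORDER else len(ORDER); in the then-branch index? is some
def pvRank (k : String) : Int :=
  if pvOrder.contains k then (((PySem.List.index? pvOrder k).getD 0 : Nat) : Int)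
  else PySem.List.len pvOrder

-- one iteration of B's backward loop; state = (rev_groups, cur)
def pvBackStepB (st : List (List (String × String)) × List (String × String))
    (line : String) : List (List (String × String)) × List (String × String) :=
  let s := PySem.Str.strip line
  if PySem.Str.startswith s "-" then
    let cur := if PySem.Str.isIn ":" s then st.2 ++ [pvKV (PySem.Str.slice s (some 1) none)] else st.2
    (st.1 ++ [cur.reverse], [])
  else if PySem.Str.isIn ":" line && PySem.Str.startswith line "  " then
    let p := pvKV s
    if p.1 ≠ "" then (st.1, st.2 ++ [p]) else st
  else st

def sort_amendments_list_alt (amendment_lines : List String) : String :=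
  let st := amendment_lines.reverse.foldl pvBackStepB ([], [])
  let rev_groups := st.1 ++ [st.2.reverse]
  let out := rev_groups.reverse.foldl (fun acc pairs =>
    let am := PySem.Dict.ofList pairs
    if am.items = [] then acc
    else
      let keys := (PySem.List.pyRange 0 (PySem.List.len pvOrder + 1) 1).flatMap
        (fun r => am.keys.filter (fun k => pvRank k == r))
      match keys with
      | [] => acc  -- unreachable: a nonempty dict has a key, and every key has a rank in range
      | k0 :: kt =>
        acc ++ [pvFmt "  - " k0 (am.getD k0 "")] ++ kt.map (fun k => pvFmt "    " k (am.getD k ""))) []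
  if out = [] then "" else "\n" ++ PySem.Str.join "\n" out

-- ===== PRECONDITION & SPEC =====
def Spec_sort_amendments_list (amendment_lines : List String) (out : String) : Prop := out = sort_amendments_list_alt amendment_lines
instance (amendment_lines : List String) (out : String) : Decidable (Spec_sort_amendments_list amendment_lines out) := by unfold Spec_sort_amendments_list; infer_instance

-- ===== CLAIM (what is proved, stated in full; the proofs are below) =====
def Claim_equal_sort_amendments_list : Prop := ∀ (amendment_lines : List String), Dom_sort_amendments_list amendment_lines → Spec_sort_amendments_list amendment_lines (sort_amendments_list amendment_lines)

-- ===== LEMMAS AND PROOFS =====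

-- proof-only: forward one-pass grouping, the common intermediate between A's streaming
-- parse and B's backward scan
def pvGroupStepB (groups : List (List (String × String))) (line : String) :
    List (List (String × String)) :=
  let s := PySem.Str.strip line
  if PySem.Str.startswith s "-" then
    groups ++ [if PySem.Str.isIn ":" s then [pvKV (PySem.Str.slice s (some 1) none)] else []]
  else if PySem.Str.isIn ":" line && PySem.Str.startswith line "  " then
    let pair := pvKV s
    if pair.1 ≠ "" then groups.dropLast ++ [((groups.getLast?).getD []) ++ [pair]]
    else groups
  else groups

-- proof-only: recursive characterisation of the grouping
def pvParseB : List String → List (List (String × String))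
  | [] => [[]]
  | first :: rest =>
    let segs := pvParseB rest
    let s := PySem.Str.strip first
    if PySem.Str.startswith s "-" then
      let own := if PySem.Str.isIn ":" s then [pvKV (PySem.Str.slice s (some 1) none)] else []
      [[]] ++ [own ++ segs.headI] ++ segs.tail
    else if PySem.Str.isIn ":" first && PySem.Str.startswith first "  " then
      let p := pvKV s
      if p.1 ≠ "" then [[p] ++ segs.headI] ++ segs.tail else segs
    else segs

-- proof-only: the lines one group contributes, in A's order of keys
def pvLinesB (am : PySem.Dict String String) : List String :=
  let keys := pvOrder.filter (fun k => am.contains k) ++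
    am.keys.filter (fun k => !pvOrder.contains k)
  match keys with
  | [] => []
  | k0 :: rest => pvFmt "  - " k0 (am.getD k0 "") :: rest.map (fun k => pvFmt "    " k (am.getD k ""))

-- proof-only: A's algorithm rewritten over the forward grouping (old proof target)
def pvMid (amendment_lines : List String) : String :=
  let groups := amendment_lines.foldl pvGroupStepB [[]]
  let result_lines := groups.foldl (fun acc pairs =>
    let am := PySem.Dict.ofList pairs
    if am.items = [] then acc else acc ++ pvLinesB am) []
  if result_lines = [] then "" else "\n" ++ PySem.Str.join "\n" result_lines

-- the relation between A's parse state and the forward groups (proof-only)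
def pvRel (G : List (List (String × String))) :
    List (PySem.Dict String String) × PySem.Dict String String :=
  (((G.dropLast).map PySem.Dict.ofList).filter (fun d => d.items ≠ []),
   PySem.Dict.ofList ((G.getLast?).getD []))

theorem pv_head_dropWhile {α : Type} (p : α → Bool) (l : List α)
    (hl : 0 < (l.dropWhile p).length) : p (l.dropWhile p)[0] = false := by
  have h := List.head?_dropWhile_not p l
  rw [show (l.dropWhile p).head? = some (l.dropWhile p)[0] by
    rw [List.head?_eq_getElem?, List.getElem?_eq_getElem hl]] at h
  simpa using h

theorem pv_rstrip_prefix (v : List Char) : PySem.Chars.rstrip v <+: v := by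
  unfold PySem.Chars.rstrip
  have h := (List.dropWhile_suffix (l := v.reverse) PySem.Chars.isspace).reverse
  simpa using h

theorem pv_lstrip_dropWhile (v : List Char) :
    PySem.Chars.lstrip v = List.dropWhile PySem.Chars.isspace v := rfl

theorem pv_lstrip_rstrip_lstrip (u : List Char) :
    PySem.Chars.lstrip (PySem.Chars.rstrip (PySem.Chars.lstrip u))
      = PySem.Chars.rstrip (PySem.Chars.lstrip u) := by
  rw [pv_lstrip_dropWhile (PySem.Chars.rstrip (PySem.Chars.lstrip u))]
  apply List.dropWhile_eq_self_iff.mpr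
  intro hl
  have hpre := pv_rstrip_prefix (PySem.Chars.lstrip u)
  have hv : 0 < (PySem.Chars.lstrip u).length := lt_of_lt_of_le hl hpre.length_le
  rw [hpre.getElem hl]
  simp only [pv_lstrip_dropWhile] at hv ⊢
  simp [pv_head_dropWhile PySem.Chars.isspace u hv]

theorem pv_rstrip_idem (v : List Char) :
    PySem.Chars.rstrip (PySem.Chars.rstrip v) = PySem.Chars.rstrip v := by
  simp only [PySem.Chars.rstrip, List.reverse_reverse]
  rw [List.dropWhile_eq_self_iff.mpr]
  intro hl
  simp [pv_head_dropWhile PySem.Chars.isspace v.reverse hl]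

theorem pv_strip_pad (s : String) :
    PySem.Str.strip ("  " ++ PySem.Str.strip s) = PySem.Str.strip s := by
  apply String.ext
  rw [PySem.Str.toList_strip, PySem.Str.toList_strip, String.toList_append, PySem.Str.toList_strip]
  show PySem.Chars.rstrip (PySem.Chars.lstrip (' ' :: ' ' :: PySem.Chars.strip s.toList))
      = PySem.Chars.strip s.toList
  have h1 : PySem.Chars.lstrip (' ' :: ' ' :: PySem.Chars.strip s.toList)
      = PySem.Chars.lstrip (PySem.Chars.strip s.toList) := by
    rw [pv_lstrip_dropWhile, pv_lstrip_dropWhile]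
    simp [PySem.Chars.isspace]
  rw [h1]
  show PySem.Chars.rstrip (PySem.Chars.lstrip (PySem.Chars.rstrip (PySem.Chars.lstrip s.toList)))
      = PySem.Chars.rstrip (PySem.Chars.lstrip s.toList)
  rw [pv_lstrip_rstrip_lstrip, pv_rstrip_idem]

theorem pv_sw_collapse (l : String) :
    (PySem.Str.startswith l "    " || PySem.Str.startswith l "  ") = PySem.Str.startswith l "  " := by
  cases h2 : PySem.Str.startswith l "  " with
  | true => simp
  | false =>
    simp only [Bool.or_false]
    rw [Bool.eq_false_iff] at h2 ⊢
    intro h4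
    apply h2
    rw [PySem.Str.startswith_eq] at h4 ⊢
    rw [PySem.Chars.startswith_iff] at h4 ⊢
    exact List.IsPrefix.trans (by decide) h4

theorem pv_sw_quote_isIn (v : String) (h : PySem.Str.startswith v "\"" = true) :
    PySem.Str.isIn "\"" v = true := by
  rw [PySem.Str.startswith_eq, PySem.Chars.startswith_iff] at h
  rw [PySem.Str.isIn_eq, PySem.Chars.isIn_iff_infix]
  exact h.isInfix

theorem pv_quote_eq (v : String) : pvQuoteA v = pvQuoteB v := by
  unfold pvQuoteA pvQuoteB
  cases hb : PySem.Str.startswith v "\"" with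
  | false => simp
  | true =>
    have hi : PySem.Str.isIn "\"" v = true := pv_sw_quote_isIn v hb
    simp at hi
    simp [hi]

theorem pv_ofList_append (g : List (String × String)) (p : String × String) :
    PySem.Dict.ofList (g ++ [p]) = (PySem.Dict.ofList g).insert p.1 p.2 := by
  simp [PySem.Dict.ofList, PySem.Dict.update, List.foldl_append]

-- A's parse-state abstraction of the forward groups
def pvAms (G : List (List (String × String))) : List (PySem.Dict String String) :=
  (G.map PySem.Dict.ofList).filter (fun d => d.items ≠ [])

theorem pv_rel_flush (gs : List (List (String × String))) (g : List (String × String)) :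
    (if (PySem.Dict.ofList g).items ≠ [] then pvAms gs ++ [PySem.Dict.ofList g] else pvAms gs)
      = pvAms (gs ++ [g]) := by
  unfold pvAms
  rw [List.map_append, List.filter_append]
  split <;> simp_all

theorem pv_rel_concat (G : List (List (String × String))) (h : List (String × String)) :
    pvRel (G ++ [h]) = (pvAms G, PySem.Dict.ofList h) := by
  unfold pvRel pvAms
  rw [List.dropLast_concat, List.getLast?_concat]
  rfl

theorem pv_step_sim (G : List (List (String × String))) (hG : G ≠ []) (line : String) :
    pvParseStepA (pvRel G) line = pvRel (pvGroupStepB G line) := by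
  obtain ⟨gs, g, rfl⟩ : ∃ gs g, G = gs ++ [g] := by
    rcases List.eq_nil_or_concat G with h | ⟨gs, g, h⟩
    · exact absurd h hG
    · exact ⟨gs, g, by simpa [List.concat_eq_append] using h⟩
  unfold pvParseStepA pvGroupStepB
  rw [pv_rel_concat gs g]
  by_cases hd : PySem.Str.startswith (PySem.Str.strip line) "-" = true
  · by_cases hc : PySem.Str.isIn ":" (PySem.Str.strip line) = true
    · simp only [hd, hc, if_true]
      rw [pv_rel_concat (gs ++ [g])]
      refine Prod.ext ?_ ?_
      · simpa using pv_rel_flush gs g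
      · simp [pvKV, PySem.Dict.ofList, PySem.Dict.update]
    · simp only [hd, hc, if_true]
      rw [pv_rel_concat (gs ++ [g])]
      refine Prod.ext ?_ ?_
      · simpa using pv_rel_flush gs g
      · rfl
  · simp only [hd]
    rw [pv_sw_collapse line]
    simp only [pvKV]
    split_ifs <;> simp_all [pv_rel_concat, pv_ofList_append]

theorem pv_groups_ne_nil (G : List (List (String × String))) (hG : G ≠ []) (line : String) :
    pvGroupStepB G line ≠ [] := by
  unfold pvGroupStepB
  by_cases h1 : PySem.Str.startswith (PySem.Str.strip line) "-" = true
  · rw [if_pos h1]; simp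
  · rw [if_neg h1]
    by_cases h2 : (PySem.Str.isIn ":" line && PySem.Str.startswith line "  ") = true
    · rw [if_pos h2]
      by_cases h3 : (pvKV (PySem.Str.strip line)).1 ≠ ""
      · simp [h3]
      · simp [h3, hG]
    · rw [if_neg h2]; exact hG

theorem pv_fold_sim (lines : List String) (G : List (List (String × String))) (hG : G ≠ []) :
    lines.foldl pvParseStepA (pvRel G) = pvRel (lines.foldl pvGroupStepB G) := by
  induction lines generalizing G with
  | nil => rfl
  | cons l t ih =>
    rw [List.foldl_cons, List.foldl_cons, pv_step_sim G hG l]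
    exact ih (pvGroupStepB G l) (pv_groups_ne_nil G hG l)

theorem pv_emit_false (am : PySem.Dict String String) (ks : List String) (acc : List String) :
    ks.foldl (fun st2 prop => pvEmitStepA st2 prop (am.getD prop "")) (acc, false)
      = (acc ++ ks.map (fun k => "    " ++ k ++ ": " ++ pvQuoteA (am.getD k "")), false) := by
  induction ks generalizing acc with
  | nil => simp
  | cons k t ih =>
    rw [List.foldl_cons]
    rw [show pvEmitStepA (acc, false) k (am.getD k "")
        = (acc ++ ["    " ++ k ++ ": " ++ pvQuoteA (am.getD k "")], false) from rfl]
    rw [ih]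
    simp

theorem pv_emit_am (am : PySem.Dict String String) (lines : List String) :
    (List.foldl (fun st2 prop => pvEmitStepA st2 prop (am.getD prop ""))
        (List.foldl (fun st2 prop =>
            if am.contains prop = true then pvEmitStepA st2 prop (am.getD prop "") else st2)
          (lines, true) pvOrder)
        (List.filter (fun k => !pvOrder.contains k) am.keys)).1
      = lines ++ pvLinesB am := by
  rw [PySem.List.foldl_if_eq_foldl_filter]
  rw [← List.foldl_append]
  unfold pvLinesB
  cases hks : pvOrder.filter (fun k => am.contains k) ++ am.keys.filter (fun k => !pvOrder.contains k) with
  | nil => simp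
  | cons k0 rest =>
    rw [List.foldl_cons]
    rw [show pvEmitStepA (lines, true) k0 (am.getD k0 "")
        = (lines ++ ["  - " ++ k0 ++ ": " ++ pvQuoteA (am.getD k0 "")], false) from rfl]
    rw [pv_emit_false]
    simp [pv_quote_eq, pvFmt]

theorem pv_keys_ne_nil (am : PySem.Dict String String) (h : am.items ≠ []) :
    pvOrder.filter (fun k => am.contains k) ++ am.keys.filter (fun k => !pvOrder.contains k) ≠ [] := by
  cases hit : am.items with
  | nil => exact absurd hit h
  | cons p t =>
    have hk : p.1 ∈ am.keys := by
      show p.1 ∈ am.items.map Prod.fst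
      rw [hit]; exact List.mem_map_of_mem (List.mem_cons_self ..)
    have hcon : am.contains p.1 = true := (PySem.Dict.contains_iff_mem_keys am p.1).mpr hk
    intro hcontra
    rw [List.append_eq_nil_iff] at hcontra
    cases ho : pvOrder.contains p.1 with
    | true =>
      have hmem : p.1 ∈ pvOrder.filter (fun k => am.contains k) := by
        rw [List.mem_filter]
        exact ⟨by simpa using ho, hcon⟩
      rw [hcontra.1] at hmem
      simp at hmem
    | false =>
      have hmem : p.1 ∈ am.keys.filter (fun k => !pvOrder.contains k) := by
        rw [List.mem_filter]
        exact ⟨hk, by simpa using ho⟩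
      rw [hcontra.2] at hmem
      simp at hmem

theorem pv_linesB_ne_nil (am : PySem.Dict String String) (h : am.items ≠ []) :
    pvLinesB am ≠ [] := by
  unfold pvLinesB
  obtain ⟨k0, rest, hE⟩ := List.exists_cons_of_ne_nil (pv_keys_ne_nil am h)
  rw [hE]
  simp

theorem pv_enum_tail (xs : List String) (s : Int) (hs : 1 ≤ s) (acc : List String) :
    (PySem.List.enumerate xs s).foldl
      (fun acc p => if p.1 == 0 && PySem.Str.startswith (PySem.Str.strip p.2) "-" then
          acc ++ ["  " ++ PySem.Str.strip p.2] else acc ++ [p.2]) acc = acc ++ xs := by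
  induction xs generalizing s acc with
  | nil => simp [PySem.List.enumerate]
  | cons x t ih =>
    rw [PySem.List.enumerate_cons, List.foldl_cons]
    have h0 : ((s == 0) : Bool) = false := by simpa using (by omega : ¬ s = 0)
    rw [show (if ((s == 0) && PySem.Str.startswith (PySem.Str.strip x) "-" : Bool) = true then
        acc ++ ["  " ++ PySem.Str.strip x] else acc ++ [x]) = acc ++ [x] from by rw [h0]; simp]
    rw [ih (s + 1) (by omega)]
    simp

theorem pv_processed_cons (l0 : String) (rest : List String) :
    (PySem.List.enumerate (l0 :: rest)).foldl
      (fun acc p => if p.1 == 0 && PySem.Str.startswith (PySem.Str.strip p.2) "-" then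
          acc ++ ["  " ++ PySem.Str.strip p.2] else acc ++ [p.2]) []
      = (if PySem.Str.startswith (PySem.Str.strip l0) "-" = true then
          "  " ++ PySem.Str.strip l0 else l0) :: rest := by
  rw [show PySem.List.enumerate (l0 :: rest) = (0, l0) :: PySem.List.enumerate rest 1 from by
    rw [PySem.List.enumerate_cons]; norm_num]
  rw [List.foldl_cons, pv_enum_tail rest 1 (by omega)]
  by_cases hsw : PySem.Str.startswith (PySem.Str.strip l0) "-" = true
  · rw [if_pos hsw]; simp at hsw; simp [hsw]
  · rw [if_neg hsw]; simp at hsw; simp [hsw]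

theorem pv_step_first (st : List (PySem.Dict String String) × PySem.Dict String String)
    (l0 : String) :
    pvParseStepA st (if PySem.Str.startswith (PySem.Str.strip l0) "-" = true then
        "  " ++ PySem.Str.strip l0 else l0) = pvParseStepA st l0 := by
  by_cases hsw : PySem.Str.startswith (PySem.Str.strip l0) "-" = true
  · rw [if_pos hsw]
    unfold pvParseStepA
    rw [pv_strip_pad l0]
    simp at hsw
    simp [hsw]
  · rw [if_neg hsw]

theorem pv_foldG_ne_nil (lines : List String) (G : List (List (String × String))) (hG : G ≠ []) :
    lines.foldl pvGroupStepB G ≠ [] := by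
  induction lines generalizing G with
  | nil => exact hG
  | cons l t ih => exact ih _ (pv_groups_ne_nil G hG l)

-- ===== A = pvMid (A-side proof, as before) =====
theorem pv_A_eq_mid (ls : List String) : sort_amendments_list ls = pvMid ls := by
  cases ls with
  | nil => rfl
  | cons l0 rest =>
    unfold sort_amendments_list pvMid
    dsimp only
    rw [pv_processed_cons l0 rest]
    rw [List.foldl_cons (f := pvParseStepA), pv_step_first, ← List.foldl_cons (f := pvParseStepA)]
    rw [show (([], PySem.Dict.empty) :
        List (PySem.Dict String String) × PySem.Dict String String) = pvRel [[]] from rfl]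
    rw [pv_fold_sim (l0 :: rest) [[]] (by simp)]
    obtain ⟨gs, g, hGg⟩ : ∃ gs g, (l0 :: rest).foldl pvGroupStepB [[]] = gs ++ [g] := by
      rcases List.eq_nil_or_concat ((l0 :: rest).foldl pvGroupStepB [[]]) with h | ⟨gs, g, h⟩
      · exact absurd h (pv_foldG_ne_nil (l0 :: rest) [[]] (by simp))
      · exact ⟨gs, g, by simpa [List.concat_eq_append] using h⟩
    rw [hGg, pv_rel_concat gs g]
    dsimp only
    rw [pv_rel_flush gs g]
    rw [show (fun (lines : List String) (am : PySem.Dict String String) =>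
        (List.foldl (fun st2 prop => pvEmitStepA st2 prop (am.getD prop ""))
          (List.foldl (fun st2 prop =>
              if am.contains prop = true then pvEmitStepA st2 prop (am.getD prop "") else st2)
            (lines, true) pvOrder)
          (List.filter (fun k => !pvOrder.contains k) am.keys)).1)
        = fun lines am => lines ++ pvLinesB am from
      funext fun lines => funext fun am => pv_emit_am am lines]
    rw [PySem.List.foldl_append_eq_flatMap]
    rw [show (fun (acc : List String) (pairs : List (String × String)) =>
        if (PySem.Dict.ofList pairs).items = [] then acc else acc ++ pvLinesB (PySem.Dict.ofList pairs))
        = fun acc pairs =>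
          if (PySem.Dict.ofList pairs).items ≠ [] then acc ++ pvLinesB (PySem.Dict.ofList pairs) else acc from by
      funext acc pairs
      by_cases hi : (PySem.Dict.ofList pairs).items = [] <;> simp [hi]]
    rw [PySem.List.foldl_ite_eq_foldl_filter]
    rw [PySem.List.foldl_append_eq_flatMap]
    rw [show ((gs ++ [g]).filter (fun x => decide ((PySem.Dict.ofList x).items ≠ []))).flatMap
          (fun pairs => pvLinesB (PySem.Dict.ofList pairs))
        = (pvAms (gs ++ [g])).flatMap pvLinesB from by
      simp [pvAms, List.filter_map, List.flatMap_map, Function.comp_def, List.filter_singleton]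
      cases decide ((PySem.Dict.ofList g).items = []) <;> simp]
    by_cases hAM : pvAms (gs ++ [g]) = []
    · simp [hAM]
    · have hL : (pvAms (gs ++ [g])).flatMap pvLinesB ≠ [] := by
        obtain ⟨d, l', hd⟩ := List.exists_cons_of_ne_nil hAM
        intro hc
        rw [List.flatMap_eq_nil_iff] at hc
        have hdAM : d ∈ pvAms (gs ++ [g]) := hd ▸ List.mem_cons_self ..
        have hitems : d.items ≠ [] := by
          have h2 := List.mem_filter.mp
            (show d ∈ (List.map PySem.Dict.ofList (gs ++ [g])).filter
              (fun d => decide (d.items ≠ [])) from hdAM)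
          simpa using h2.2
        exact pv_linesB_ne_nil d hitems (hc d hdAM)
      simp [hAM, hL]

-- ===== forward grouping = recursive characterisation =====
theorem pv_foldG_parse (lines : List String) (gs : List (List (String × String)))
    (g : List (String × String)) :
    lines.foldl pvGroupStepB (gs ++ [g])
      = gs ++ (g ++ (pvParseB lines).headI) :: (pvParseB lines).tail := by
  induction lines generalizing gs g with
  | nil => simp [pvParseB]
  | cons l t ih =>
    rw [List.foldl_cons]
    by_cases hd : PySem.Str.startswith (PySem.Str.strip l) "-" = true
    · have hstep : pvGroupStepB (gs ++ [g]) l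
          = (gs ++ [g]) ++ [if PySem.Str.isIn ":" (PySem.Str.strip l) then
              [pvKV (PySem.Str.slice (PySem.Str.strip l) (some 1) none)] else []] := by
        unfold pvGroupStepB; rw [if_pos hd]
      have hparse : pvParseB (l :: t)
          = [] :: ((if PySem.Str.isIn ":" (PySem.Str.strip l) then
              [pvKV (PySem.Str.slice (PySem.Str.strip l) (some 1) none)] else [])
                ++ (pvParseB t).headI) :: (pvParseB t).tail := by
        simp only [pvParseB]; rw [if_pos hd]; rfl
      rw [hstep, ih, hparse]
      simp
    · by_cases h2 : (PySem.Str.isIn ":" l && PySem.Str.startswith l "  ") = true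
      · by_cases h3 : (pvKV (PySem.Str.strip l)).1 ≠ ""
        · have hstep : pvGroupStepB (gs ++ [g]) l
              = gs ++ [g ++ [pvKV (PySem.Str.strip l)]] := by
            unfold pvGroupStepB
            rw [if_neg hd, if_pos h2, if_pos h3, List.dropLast_concat, List.getLast?_concat]
            rfl
          have hparse : pvParseB (l :: t)
              = ([pvKV (PySem.Str.strip l)] ++ (pvParseB t).headI) :: (pvParseB t).tail := by
            simp only [pvParseB]; rw [if_neg hd, if_pos h2, if_pos h3]; rfl
          rw [hstep, ih, hparse]
          simp [List.append_assoc]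
        · have hstep : pvGroupStepB (gs ++ [g]) l = gs ++ [g] := by
            unfold pvGroupStepB; rw [if_neg hd, if_pos h2, if_neg h3]
          have hparse : pvParseB (l :: t) = pvParseB t := by
            simp only [pvParseB]; rw [if_neg hd, if_pos h2, if_neg h3]
          rw [hstep, ih, hparse]
      · have hstep : pvGroupStepB (gs ++ [g]) l = gs ++ [g] := by
          unfold pvGroupStepB; rw [if_neg hd, if_neg h2]
        have hparse : pvParseB (l :: t) = pvParseB t := by
          simp only [pvParseB]; rw [if_neg hd, if_neg h2]
        rw [hstep, ih, hparse]

-- ===== backward scan = recursive characterisation =====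
theorem pv_back_eq (lines : List String) :
    pvParseB lines
      = (lines.foldr (fun x st => pvBackStepB st x) ([], [])).2.reverse
          :: (lines.foldr (fun x st => pvBackStepB st x) ([], [])).1.reverse := by
  induction lines with
  | nil => rfl
  | cons l t ih =>
    rw [List.foldr_cons]
    set st := t.foldr (fun x st => pvBackStepB st x) ([], []) with hst
    by_cases hd : PySem.Str.startswith (PySem.Str.strip l) "-" = true
    · by_cases hc : PySem.Str.isIn ":" (PySem.Str.strip l) = true
      · have hstep : pvBackStepB st l
            = (st.1 ++ [(st.2 ++ [pvKV (PySem.Str.slice (PySem.Str.strip l) (some 1) none)]).reverse],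
               []) := by
          unfold pvBackStepB; rw [if_pos hd, if_pos hc]
        have hparse : pvParseB (l :: t)
            = [] :: ([pvKV (PySem.Str.slice (PySem.Str.strip l) (some 1) none)]
                ++ (pvParseB t).headI) :: (pvParseB t).tail := by
          simp only [pvParseB]; rw [if_pos hd, if_pos hc]; rfl
        rw [hparse, hstep, ih]
        simp
      · have hstep : pvBackStepB st l = (st.1 ++ [st.2.reverse], []) := by
          unfold pvBackStepB; rw [if_pos hd, if_neg hc]
        have hparse : pvParseB (l :: t)
            = [] :: (pvParseB t).headI :: (pvParseB t).tail := by
          simp only [pvParseB]; rw [if_pos hd, if_neg hc]; rfl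
        rw [hparse, hstep, ih]
        simp
    · by_cases h2 : (PySem.Str.isIn ":" l && PySem.Str.startswith l "  ") = true
      · by_cases h3 : (pvKV (PySem.Str.strip l)).1 ≠ ""
        · have hstep : pvBackStepB st l = (st.1, st.2 ++ [pvKV (PySem.Str.strip l)]) := by
            unfold pvBackStepB; rw [if_neg hd, if_pos h2, if_pos h3]
          have hparse : pvParseB (l :: t)
              = ([pvKV (PySem.Str.strip l)] ++ (pvParseB t).headI) :: (pvParseB t).tail := by
            simp only [pvParseB]; rw [if_neg hd, if_pos h2, if_pos h3]; rfl
          rw [hparse, hstep, ih]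
          simp
        · have hstep : pvBackStepB st l = st := by
            unfold pvBackStepB; rw [if_neg hd, if_pos h2, if_neg h3]
          have hparse : pvParseB (l :: t) = pvParseB t := by
            simp only [pvParseB]; rw [if_neg hd, if_pos h2, if_neg h3]
          rw [hparse, hstep, ih]
      · have hstep : pvBackStepB st l = st := by
          unfold pvBackStepB; rw [if_neg hd, if_neg h2]
        have hparse : pvParseB (l :: t) = pvParseB t := by
          simp only [pvParseB]; rw [if_neg hd, if_neg h2]
        rw [hparse, hstep, ih]

-- ===== key order: rank partition = preferred-then-unknown =====
theorem pv_rank_spec (k : String) :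
    pvRank k = if k = "beteckning" then 0 else if k = "rubrik" then 1
      else if k = "ikraft_datum" then 2 else if k = "anteckningar" then 3 else 4 := by
  by_cases h1 : k = "beteckning"
  · subst h1; decide
  by_cases h2 : k = "rubrik"
  · subst h2; decide
  by_cases h3 : k = "ikraft_datum"
  · subst h3; decide
  by_cases h4 : k = "anteckningar"
  · subst h4; decide
  have hmem : k ∉ pvOrder := by
    simp [pvOrder]
    exact ⟨h1, h2, h3, h4⟩
  simp [pvRank, h1, h2, h3, h4, PySem.List.len_eq, pvOrder]

theorem pv_filter_eq_of_nodup (l : List String) (hl : l.Nodup) (x : String) :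
    l.filter (fun k => k == x) = if x ∈ l then [x] else [] := by
  induction l with
  | nil => simp
  | cons a t ih =>
    rw [List.nodup_cons] at hl
    by_cases ha : a = x
    · subst ha
      simp [ih hl.2, hl.1]
    · have hx : ¬ x = a := fun h => ha h.symm
      simp [ha, hx, ih hl.2]

-- the five rank buckets, concatenated, are A's key order
theorem pv_keys_order (am : PySem.Dict String String) (hnd : am.keys.Nodup) :
    (PySem.List.pyRange 0 (PySem.List.len pvOrder + 1) 1).flatMap
        (fun r => am.keys.filter (fun k => pvRank k == r))
      = pvOrder.filter (fun k => am.contains k) ++ am.keys.filter (fun k => !pvOrder.contains k) := by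
  have hrange : PySem.List.pyRange 0 (PySem.List.len pvOrder + 1) 1 = [0, 1, 2, 3, 4] := by decide
  rw [hrange]
  have bucket : ∀ (r : Int) (o : String),
      (∀ k, ((pvRank k == r) : Bool) = (k == o)) →
      am.keys.filter (fun k => pvRank k == r) = if am.contains o = true then [o] else [] := by
    intro r o hpt
    rw [List.filter_congr (fun k _ => hpt k)]
    rw [pv_filter_eq_of_nodup am.keys hnd o]
    rw [PySem.Dict.contains_eq_decide_mem_keys]
    by_cases hm : o ∈ am.keys <;> simp [hm]
  have hpt : ∀ (r : Int) (o : String),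
      (if o = "beteckning" then (0:Int) else if o = "rubrik" then 1
        else if o = "ikraft_datum" then 2 else if o = "anteckningar" then 3 else 4) = r →
      o ∈ pvOrder → ∀ k, ((pvRank k == r) : Bool) = (k == o) := by
    intro r o hro ho k
    rw [pv_rank_spec]
    subst hro
    fin_cases ho <;> split_ifs <;> simp_all
  have hb0 := bucket 0 "beteckning" (hpt 0 "beteckning" (by decide) (by decide))
  have hb1 := bucket 1 "rubrik" (hpt 1 "rubrik" (by decide) (by decide))
  have hb2 := bucket 2 "ikraft_datum" (hpt 2 "ikraft_datum" (by decide) (by decide))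
  have hb3 := bucket 3 "anteckningar" (hpt 3 "anteckningar" (by decide) (by decide))
  have hb4 : am.keys.filter (fun k => pvRank k == (4 : Int))
      = am.keys.filter (fun k => !pvOrder.contains k) := by
    apply List.filter_congr
    intro k _
    rw [pv_rank_spec]
    by_cases h1 : k = "beteckning"
    · subst h1; decide
    by_cases h2 : k = "rubrik"
    · subst h2; decide
    by_cases h3 : k = "ikraft_datum"
    · subst h3; decide
    by_cases h4 : k = "anteckningar"
    · subst h4; decide
    have hmem : k ∉ pvOrder := by
      simp [pvOrder]
      exact ⟨h1, h2, h3, h4⟩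
    simp [h1, h2, h3, h4, pvOrder]
  have horder : pvOrder.filter (fun k => am.contains k)
      = (if am.contains "beteckning" = true then ["beteckning"] else [])
        ++ (if am.contains "rubrik" = true then ["rubrik"] else [])
        ++ (if am.contains "ikraft_datum" = true then ["ikraft_datum"] else [])
        ++ (if am.contains "anteckningar" = true then ["anteckningar"] else []) := by
    simp only [pvOrder, List.filter_cons, List.filter_nil]
    by_cases c0 : am.contains "beteckning" = true <;>
      by_cases c1 : am.contains "rubrik" = true <;>
        by_cases c2 : am.contains "ikraft_datum" = true <;>
          by_cases c3 : am.contains "anteckningar" = true <;>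
            simp [c0, c1, c2, c3]
  simp only [List.flatMap_cons, List.flatMap_nil, List.append_nil]
  rw [hb0, hb1, hb2, hb3, hb4, horder]
  simp [List.append_assoc]

-- the two per-group emit bodies agree
theorem pv_body_eq (acc : List String) (pairs : List (String × String)) :
    (let am := PySem.Dict.ofList pairs
     if am.items = [] then acc
     else
       let keys := (PySem.List.pyRange 0 (PySem.List.len pvOrder + 1) 1).flatMap
         (fun r => am.keys.filter (fun k => pvRank k == r))
       match keys with
       | [] => acc
       | k0 :: kt =>
         acc ++ [pvFmt "  - " k0 (am.getD k0 "")] ++ kt.map (fun k => pvFmt "    " k (am.getD k "")))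
    = (let am := PySem.Dict.ofList pairs
       if am.items = [] then acc else acc ++ pvLinesB am) := by
  set am := PySem.Dict.ofList pairs with ham
  by_cases hi : am.items = []
  · simp [hi]
  · simp only [hi, if_false]
    rw [pv_keys_order am (ham ▸ PySem.Dict.nodup_keys_ofList pairs)]
    unfold pvLinesB
    obtain ⟨k0, kt, hE⟩ := List.exists_cons_of_ne_nil (pv_keys_ne_nil am hi)
    rw [hE]
    simp

-- ===== pvMid = B =====
theorem pv_mid_eq_alt (ls : List String) : pvMid ls = sort_amendments_list_alt ls := by
  unfold pvMid sort_amendments_list_alt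
  dsimp only
  have hback : ls.reverse.foldl pvBackStepB ([], [])
      = ls.foldr (fun x st => pvBackStepB st x) ([], []) := by
    rw [List.foldl_reverse]
  rw [hback]
  have hgroups : ((ls.foldr (fun x st => pvBackStepB st x) ([], [])).1
      ++ [(ls.foldr (fun x st => pvBackStepB st x) ([], [])).2.reverse]).reverse = pvParseB ls := by
    rw [pv_back_eq]
    simp
  have hfold : ls.foldl pvGroupStepB [[]] = pvParseB ls := by
    rw [show ([[]] : List (List (String × String))) = [] ++ [[]] from rfl]
    rw [pv_foldG_parse]
    rw [pv_back_eq]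
    simp
  rw [hfold, hgroups]
  refine congrArg (fun X => if X = [] then "" else "\n" ++ PySem.Str.join "\n" X) ?_
  apply List.foldl_ext
  intro acc pairs _
  exact (pv_body_eq acc pairs).symm

-- ===== VERDICT (by name: the statement is the Claim_ definition above) =====
theorem sort_amendments_list_spec : Claim_equal_sort_amendments_list := by
  intro ls _
  unfold Spec_sort_amendments_list
  rw [pv_A_eq_mid, pv_mid_eq_alt]
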